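-- pv_equiv track=rewrite | github.com/reiderdwien/royalur | calc.py | calc
-- ===== SOURCE A (Python) =====
-- import math
--
-- def calc(p,m,n):
--     states = 0
--     for p1 in range(0,min(m+n+1,p+1)):
--         for p2 in range(0,min(m+n+1,p+1)):
--             for j in range(max(0,p1-m), min(n,p1) + 1):
--                 add_states = (p-p1+1)*(p-p2+1)*math.comb(n, j)*math.comb(m, p1 - j)*math.comb(m+n-(p1-j), p2)
--                 states = states + add_states
--     return states
-- ===== SOURCE B (Python) =====
-- import math
--
-- def calc(p, m, n):
--     # Factor the p2 loop out: precompute T[k] = sum_{p2<P} (p-p2+1)*C(m+n-k, p2),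
--     # then sum over (k=p1-j, j) with 0<=k<=min(m,P-1), 0<=j<=min(n,P-1-k).
--     P = min(m + n + 1, p + 1)
--     K = min(m, P - 1)
--     T = [sum((p - p2 + 1) * math.comb(m + n - k, p2) for p2 in range(P))
--          for k in range(K + 1)]
--     total = 0
--     for k in range(K + 1):
--         c = math.comb(m, k) * T[k]
--         for j in range(min(n, P - 1 - k) + 1):
--             total += (p - (j + k) + 1) * math.comb(n, j) * c
--     return total
-- ===== Notes on version B (the rewrite author's own statement) =====
-- stated objective: faster
-- what changed: Replaced the triple-nested loop by precomputing T[k]=sum_p2 (p-p2+1)*C(m+n-k,p2) once per k and reindexing the (p1,j) double loop by (k=p1-j, j), removing the inner p2 scan.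
import Mathlib
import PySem

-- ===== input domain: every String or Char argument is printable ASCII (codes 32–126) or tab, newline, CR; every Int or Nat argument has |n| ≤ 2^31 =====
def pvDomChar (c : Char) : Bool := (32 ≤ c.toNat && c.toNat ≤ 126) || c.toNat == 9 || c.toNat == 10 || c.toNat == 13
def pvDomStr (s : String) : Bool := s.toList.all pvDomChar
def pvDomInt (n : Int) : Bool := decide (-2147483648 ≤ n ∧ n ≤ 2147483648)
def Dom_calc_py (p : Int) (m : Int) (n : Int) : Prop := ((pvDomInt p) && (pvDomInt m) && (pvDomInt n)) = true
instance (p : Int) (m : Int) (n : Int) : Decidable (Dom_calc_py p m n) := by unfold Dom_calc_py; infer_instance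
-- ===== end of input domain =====

-- B precomputes the p2-sum once per k and reindexes the (p1, j) loops by (k = p1 - j, j),
-- removing the inner p2 scan; same return value everywhere (objective: faster).

-- math.comb(a, b); exact for 0 ≤ a, 0 ≤ b — the only arguments either program evaluates it on.
def pyComb (a b : Int) : Int := (Nat.choose a.toNat b.toNat : Int)

-- ===== PORT A =====
def calc_py (p : Int) (m : Int) (n : Int) : Int :=
  (PySem.List.pyRange 0 (min (m + n + 1) (p + 1)) 1).foldl (fun states p1 =>
    (PySem.List.pyRange 0 (min (m + n + 1) (p + 1)) 1).foldl (fun states p2 =>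
      (PySem.List.pyRange (max 0 (p1 - m)) (min n p1 + 1) 1).foldl (fun states j =>
        states + (p - p1 + 1) * (p - p2 + 1) * pyComb n j * pyComb m (p1 - j) *
          pyComb (m + n - (p1 - j)) p2) states) states) 0

-- ===== PORT B =====
def calc_py_alt (p : Int) (m : Int) (n : Int) : Int :=
  let P := min (m + n + 1) (p + 1)
  let K := min m (P - 1)
  let T : List Int := (PySem.List.pyRange 0 (K + 1) 1).map (fun k =>
    ((PySem.List.pyRange 0 P 1).map (fun p2 => (p - p2 + 1) * pyComb (m + n - k) p2)).sum)
  (PySem.List.pyRange 0 (K + 1) 1).foldl (fun total k =>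
    let c := pyComb m k * PySem.List.pyGetD T k 0
    (PySem.List.pyRange 0 (min n (P - 1 - k) + 1) 1).foldl (fun total j =>
      total + (p - (j + k) + 1) * pyComb n j * c) total) 0

-- ===== PRECONDITION & SPEC =====
def Spec_calc_py (p : Int) (m : Int) (n : Int) (out : Int) : Prop := out = calc_py_alt p m n
instance (p : Int) (m : Int) (n : Int) (out : Int) : Decidable (Spec_calc_py p m n out) := by unfold Spec_calc_py; infer_instance

-- ===== CLAIM (what is proved, stated in full; the proofs are below) =====
def Claim_equal_calc_py : Prop := ∀ (p : Int) (m : Int) (n : Int), Dom_calc_py p m n → Spec_calc_py p m n (calc_py p m n)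

-- ===== LEMMAS AND PROOFS =====

-- a list sum over a Python range is a Finset sum over the Int interval
lemma sum_map_pyRange (f : Int → Int) (a b : Int) :
    ((PySem.List.pyRange a b 1).map f).sum = ∑ x ∈ Finset.Ico a b, f x := by
  have h : ∀ (N : Nat) (b : Int), b - a = N →
      ((PySem.List.pyRange a b 1).map f).sum = ∑ x ∈ Finset.Ico a b, f x := by
    intro N
    induction N with
    | zero => intro b hb
              rw [PySem.List.pyRange_one_eq_nil (by omega), Finset.Ico_eq_empty (by omega)]; simp
    | succ k ih =>
      intro b hb
      have hab : a ≤ b - 1 := by omega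
      have : b = (b-1) + 1 := by omega
      rw [this, PySem.List.pyRange_one_succ_right hab,
        ← Finset.insert_Ico_right_eq_Ico_add_one hab,
        Finset.sum_insert (by simp)]
      rw [List.map_append, List.sum_append, ih (b-1) (by omega)]
      simp [add_comm]
  by_cases hab : a ≤ b
  · exact h (b - a).toNat b (by omega)
  · rw [PySem.List.pyRange_one_eq_nil (by omega), Finset.Ico_eq_empty (by omega)]; simp

-- the factored-out p2-sum (B's T[k]), as a Finset sum; proof-side abbreviation only
noncomputable def Tf (p m n k : Int) : Int :=
  ∑ p2 ∈ Finset.Ico 0 (min (m + n + 1) (p + 1)), (p - p2 + 1) * pyComb (m + n - k) p2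

lemma calc_py_eq_sum (p m n : Int) :
    calc_py p m n =
      ∑ p1 ∈ Finset.Ico 0 (min (m+n+1) (p+1)),
        ∑ p2 ∈ Finset.Ico 0 (min (m+n+1) (p+1)),
          ∑ j ∈ Finset.Ico (max 0 (p1-m)) (min n p1 + 1),
            (p-p1+1)*(p-p2+1)*pyComb n j*pyComb m (p1-j)*pyComb (m+n-(p1-j)) p2 := by
  unfold calc_py
  have h3 : ∀ (p1 p2 acc : Int),
      (PySem.List.pyRange (max 0 (p1-m)) (min n p1 + 1) 1).foldl
        (fun st j => st + (p-p1+1)*(p-p2+1)*pyComb n j*pyComb m (p1-j)*pyComb (m+n-(p1-j)) p2) acc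
      = acc + ∑ j ∈ Finset.Ico (max 0 (p1-m)) (min n p1 + 1),
          (p-p1+1)*(p-p2+1)*pyComb n j*pyComb m (p1-j)*pyComb (m+n-(p1-j)) p2 := by
    intro p1 p2 acc
    rw [PySem.List.foldl_add, sum_map_pyRange]
  have h2 : ∀ (p1 acc : Int),
      (PySem.List.pyRange 0 (min (m+n+1) (p+1)) 1).foldl (fun st p2 =>
        (PySem.List.pyRange (max 0 (p1-m)) (min n p1 + 1) 1).foldl (fun st j =>
          st + (p-p1+1)*(p-p2+1)*pyComb n j*pyComb m (p1-j)*pyComb (m+n-(p1-j)) p2) st) acc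
      = acc + ∑ p2 ∈ Finset.Ico 0 (min (m+n+1) (p+1)),
          ∑ j ∈ Finset.Ico (max 0 (p1-m)) (min n p1 + 1),
            (p-p1+1)*(p-p2+1)*pyComb n j*pyComb m (p1-j)*pyComb (m+n-(p1-j)) p2 := by
    intro p1 acc
    simp only [h3]
    rw [PySem.List.foldl_add, sum_map_pyRange]
  simp only [h2]
  rw [PySem.List.foldl_add, sum_map_pyRange, zero_add]

lemma calc_py_alt_eq_sum (p m n : Int) :
    calc_py_alt p m n =
      ∑ k ∈ Finset.Ico 0 (min m (min (m+n+1) (p+1) - 1) + 1),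
        ∑ j ∈ Finset.Ico 0 (min n (min (m+n+1) (p+1) - 1 - k) + 1),
          (p - (j + k) + 1) * pyComb n j * (pyComb m k * Tf p m n k) := by
  have hT : ∀ k : Int, 0 ≤ k → k < min m (min (m+n+1) (p+1) - 1) + 1 →
      PySem.List.pyGetD ((PySem.List.pyRange 0 (min m (min (m+n+1) (p+1) - 1) + 1) 1).map
        (fun k => ((PySem.List.pyRange 0 (min (m+n+1) (p+1)) 1).map
          (fun p2 => (p - p2 + 1) * pyComb (m + n - k) p2)).sum)) k 0 = Tf p m n k := by
    intro k h0 h1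
    rw [PySem.List.pyGetD_map_pyRange_of_nonneg _ _ _ _ h0 h1, sum_map_pyRange, Tf]
  have h2 : ∀ (k acc : Int),
      (PySem.List.pyRange 0 (min n (min (m+n+1) (p+1) - 1 - k) + 1) 1).foldl (fun total j =>
        total + (p - (j + k) + 1) * pyComb n j *
          (pyComb m k * PySem.List.pyGetD ((PySem.List.pyRange 0 (min m (min (m+n+1) (p+1) - 1) + 1) 1).map
            (fun k => ((PySem.List.pyRange 0 (min (m+n+1) (p+1)) 1).map
              (fun p2 => (p - p2 + 1) * pyComb (m + n - k) p2)).sum)) k 0)) acc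
      = acc + ∑ j ∈ Finset.Ico 0 (min n (min (m+n+1) (p+1) - 1 - k) + 1),
          (p - (j + k) + 1) * pyComb n j *
            (pyComb m k * PySem.List.pyGetD ((PySem.List.pyRange 0 (min m (min (m+n+1) (p+1) - 1) + 1) 1).map
              (fun k => ((PySem.List.pyRange 0 (min (m+n+1) (p+1)) 1).map
                (fun p2 => (p - p2 + 1) * pyComb (m + n - k) p2)).sum)) k 0) := by
    intro k acc
    rw [PySem.List.foldl_add, sum_map_pyRange]
  show (PySem.List.pyRange 0 (min m (min (m+n+1) (p+1) - 1) + 1) 1).foldl (fun total k =>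
      (PySem.List.pyRange 0 (min n (min (m+n+1) (p+1) - 1 - k) + 1) 1).foldl (fun total j =>
        total + (p - (j + k) + 1) * pyComb n j *
          (pyComb m k * PySem.List.pyGetD ((PySem.List.pyRange 0 (min m (min (m+n+1) (p+1) - 1) + 1) 1).map
            (fun k => ((PySem.List.pyRange 0 (min (m+n+1) (p+1)) 1).map
              (fun p2 => (p - p2 + 1) * pyComb (m + n - k) p2)).sum)) k 0)) total) 0 = _
  simp only [h2]
  rw [PySem.List.foldl_add, sum_map_pyRange, zero_add]
  refine Finset.sum_congr rfl (fun k hk => Finset.sum_congr rfl (fun j hj => ?_))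
  rw [hT k (Finset.mem_Ico.mp hk).1 (Finset.mem_Ico.mp hk).2]

-- A's triple sum equals B's double sum: factor the p2-sum into Tf, then reindex (p1, j) ↦ (p1 - j, j)
lemma sums_eq (p m n : Int) :
    (∑ p1 ∈ Finset.Ico 0 (min (m+n+1) (p+1)),
      ∑ p2 ∈ Finset.Ico 0 (min (m+n+1) (p+1)),
        ∑ j ∈ Finset.Ico (max 0 (p1-m)) (min n p1 + 1),
          (p-p1+1)*(p-p2+1)*pyComb n j*pyComb m (p1-j)*pyComb (m+n-(p1-j)) p2)
    = ∑ k ∈ Finset.Ico 0 (min m (min (m+n+1) (p+1) - 1) + 1),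
        ∑ j ∈ Finset.Ico 0 (min n (min (m+n+1) (p+1) - 1 - k) + 1),
          (p - (j + k) + 1) * pyComb n j * (pyComb m k * Tf p m n k) := by
  have hfac : ∀ p1 : Int,
      (∑ p2 ∈ Finset.Ico 0 (min (m+n+1) (p+1)),
        ∑ j ∈ Finset.Ico (max 0 (p1-m)) (min n p1 + 1),
          (p-p1+1)*(p-p2+1)*pyComb n j*pyComb m (p1-j)*pyComb (m+n-(p1-j)) p2)
      = ∑ j ∈ Finset.Ico (max 0 (p1-m)) (min n p1 + 1),
          ((p-p1+1)*pyComb n j*pyComb m (p1-j)) * Tf p m n (p1-j) := by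
    intro p1
    rw [Finset.sum_comm]
    refine Finset.sum_congr rfl (fun j hj => ?_)
    rw [Tf, Finset.mul_sum]
    refine Finset.sum_congr rfl (fun p2 hp2 => ?_)
    ring
  simp only [hfac]
  rw [Finset.sum_sigma', Finset.sum_sigma']
  refine Finset.sum_nbij' (i := fun x => ⟨x.1 - x.2, x.2⟩) (j := fun y => ⟨y.1 + y.2, y.2⟩)
    ?_ ?_ ?_ ?_ ?_
  · rintro ⟨p1, j⟩ hx
    simp only [Finset.mem_sigma, Finset.mem_Ico] at hx ⊢
    omega
  · rintro ⟨k, j⟩ hy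
    simp only [Finset.mem_sigma, Finset.mem_Ico] at hy ⊢
    omega
  · rintro ⟨p1, j⟩ hx
    simp only
    congr 1 <;> omega
  · rintro ⟨k, j⟩ hy
    simp only
    congr 1 <;> omega
  · rintro ⟨p1, j⟩ hx
    simp only
    have h1 : j + (p1 - j) = p1 := by ring
    rw [h1]
    ring

-- ===== VERDICT (by name: the statement is the Claim_ definition above) =====
theorem calc_py_spec : Claim_equal_calc_py := by
  intro p m n _
  unfold Spec_calc_py
  rw [calc_py_eq_sum, calc_py_alt_eq_sum, sums_eq]
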